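-- pv_equiv track=rewrite | github.com/evergonlabs/aiframework | lib/indexers/parsers/ruby.py | _extract_rdoc_comment
-- ===== SOURCE A (Python) =====
-- def _extract_rdoc_comment(text: str, pos: int) -> str:
--     """Extract the # comment block immediately before *pos*."""
--     before = text[:pos].rstrip()
--     doc_lines: list[str] = []
--     for line in reversed(before.splitlines()):
--         stripped = line.strip()
--         if stripped.startswith("#"):
--             doc_lines.append(stripped.lstrip("#").strip())
--         else:
--             break
--     if doc_lines:
--         return doc_lines[-1]  # first logical line (reversed)
--     return ""
-- ===== SOURCE B (Python) =====
-- def _extract_rdoc_comment(text: str, pos: int) -> str: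
--     """Extract the # comment block immediately before *pos*."""
--     lines = text[:pos].rstrip().splitlines()
--     block_start = None
--     prev_comment = False
--     for i, line in enumerate(lines):
--         if line.strip().startswith("#"):
--             if not prev_comment:
--                 block_start = i
--             prev_comment = True
--         else:
--             block_start = None
--             prev_comment = False
--     if block_start is None:
--         return ""
--     return lines[block_start].strip().lstrip("#").strip()
-- ===== Notes on version B (the rewrite author's own statement) =====
-- stated objective: alternative
-- what changed: B replaces A's reversed-iteration that accumulates a list of cleaned comment lines and returns its last element by a single forward pass that only tracks the start index of the current contiguous comment run, cleaning just one line at the end.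
import Mathlib
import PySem

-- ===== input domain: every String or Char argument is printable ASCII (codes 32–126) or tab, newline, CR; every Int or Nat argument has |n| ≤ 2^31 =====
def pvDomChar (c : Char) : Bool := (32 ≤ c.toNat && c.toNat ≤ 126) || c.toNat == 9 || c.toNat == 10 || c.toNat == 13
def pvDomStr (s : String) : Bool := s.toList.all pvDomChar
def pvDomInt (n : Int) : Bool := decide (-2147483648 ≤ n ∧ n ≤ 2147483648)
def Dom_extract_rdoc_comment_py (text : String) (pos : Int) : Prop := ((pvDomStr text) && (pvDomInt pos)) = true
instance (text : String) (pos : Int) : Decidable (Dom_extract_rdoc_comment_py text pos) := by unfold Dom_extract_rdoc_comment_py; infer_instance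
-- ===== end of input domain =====

-- B replaces A's reversed iteration with an accumulator list by a forward pass tracking the
-- start index of the trailing comment run (objective: alternative, same cost).

-- shared primitive: s.lstrip("#") — exact for the single-character chars argument: drops leading '#'
def pvLstripHash (s : String) : String := String.ofList (s.toList.dropWhile (fun c => c == '#'))

-- ===== PORT A =====
def pvALoop : List String → List String → List String
  | [], acc => acc
  | line :: rest, acc =>
    let stripped := PySem.Str.strip line
    if PySem.Str.startswith stripped "#" then
      pvALoop rest (acc ++ [PySem.Str.strip (pvLstripHash stripped)])
    else acc

def extract_rdoc_comment_py (text : String) (pos : Int) : String :=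
  let before := PySem.Str.rstrip (PySem.Str.slice text none (some pos))
  let doc_lines := pvALoop (PySem.Str.splitlines before).reverse []
  if doc_lines = [] then "" else (PySem.List.pyGet? doc_lines (-1)).getD ""

-- ===== PORT B =====
def pvBStep (st : Option Int × Bool) (il : Int × String) : Option Int × Bool :=
  if PySem.Str.startswith (PySem.Str.strip il.2) "#" then
    ((if st.2 then st.1 else some il.1), true)
  else (none, false)

def extract_rdoc_comment_py_alt (text : String) (pos : Int) : String :=
  let lines := PySem.Str.splitlines (PySem.Str.rstrip (PySem.Str.slice text none (some pos)))
  let st := (PySem.List.enumerate lines 0).foldl pvBStep (none, false)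
  match st.1 with
  | none => ""
  | some i => PySem.Str.strip (pvLstripHash (PySem.Str.strip ((PySem.List.pyGet? lines i).getD "")))

-- ===== PRECONDITION & SPEC =====
def Spec_extract_rdoc_comment_py (text : String) (pos : Int) (out : String) : Prop := out = extract_rdoc_comment_py_alt text pos
instance (text : String) (pos : Int) (out : String) : Decidable (Spec_extract_rdoc_comment_py text pos out) := by unfold Spec_extract_rdoc_comment_py; infer_instance

-- ===== CLAIM (what is proved, stated in full; the proofs are below) =====
def Claim_equal_extract_rdoc_comment_py : Prop := ∀ (text : String) (pos : Int), Dom_extract_rdoc_comment_py text pos → Spec_extract_rdoc_comment_py text pos (extract_rdoc_comment_py text pos)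

-- ===== LEMMAS AND PROOFS =====
def pvC (l : String) : Bool := PySem.Str.startswith (PySem.Str.strip l) "#"
def pvClean (l : String) : String := PySem.Str.strip (pvLstripHash (PySem.Str.strip l))

lemma pvALoop_eq (R acc : List String) :
    pvALoop R acc = acc ++ (R.takeWhile pvC).map pvClean := by
  induction R generalizing acc with
  | nil => simp [pvALoop]
  | cons l rest ih =>
    simp only [pvALoop, List.takeWhile]
    by_cases h : pvC l
    · simp [pvC] at h
      simp [h, ih, pvC, pvClean]
    · simp [pvC] at h
      simp [h, pvC]

lemma pyGet?_neg_one {α : Type} (xs : List α) (h : xs ≠ []) :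
    PySem.List.pyGet? xs (-1) = xs.getLast? := by
  have hl : 1 ≤ xs.length := List.length_pos_iff.mpr h
  simp [PySem.List.pyGet?, PySem.List.pyIdx?, hl, List.getLast?_eq_getElem?]

lemma pvBStep_eq (st : Option Int × Bool) (il : Int × String) :
    pvBStep st il = if pvC il.2 then ((if st.2 then st.1 else some il.1), true) else (none, false) := rfl

lemma pvB_inv (L : List String) :
    (PySem.List.enumerate L 0).foldl pvBStep (none, false) =
      ((if (L.reverse.takeWhile pvC).isEmpty then none
        else some ((L.length : Int) - (L.reverse.takeWhile pvC).length)),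
       !(L.reverse.takeWhile pvC).isEmpty) := by
  induction L using List.reverseRecOn with
  | nil => simp [PySem.List.enumerate_nil]
  | append_singleton M x ih =>
    rw [PySem.List.enumerate_append, List.foldl_append, ih]
    simp only [PySem.List.enumerate_cons, PySem.List.enumerate_nil, List.foldl_cons,
      List.foldl_nil, List.reverse_append, List.reverse_cons, List.reverse_nil,
      List.nil_append, List.cons_append, List.takeWhile_cons, pvBStep_eq]
    by_cases h : pvC x
    · by_cases he : (M.reverse.takeWhile pvC).isEmpty
      · have h0 : M.reverse.takeWhile pvC = [] := List.isEmpty_iff.mp he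
        simp [h, h0]
      · have h0 : (M.reverse.takeWhile pvC).isEmpty = false := by simpa using he
        simp [h, h0]
    · simp [h]

lemma takeWhile_rev_getLast?_eq (L : List String)
    (h : ¬ (L.reverse.takeWhile pvC).isEmpty = true) :
    (L.reverse.takeWhile pvC).getLast? = L[L.length - (L.reverse.takeWhile pvC).length]? := by
  set T := L.reverse.takeWhile pvC with hT
  have hne : T ≠ [] := by simpa [List.isEmpty_iff] using h
  have hk : T.length ≤ L.length := by
    calc T.length ≤ L.reverse.length := (List.takeWhile_sublist _).length_le
    _ = L.length := List.length_reverse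
  have hpos : 0 < T.length := List.length_pos_iff.mpr hne
  have htake : T = L.reverse.take T.length := by
    have hpre : T <+: L.reverse := by rw [hT]; exact List.takeWhile_prefix _
    exact List.prefix_iff_eq_take.mp hpre
  rw [List.getLast?_eq_getElem?, htake, List.length_take]
  have hmin : min T.length L.reverse.length = T.length := by
    simp only [List.length_reverse]; omega
  rw [hmin, List.getElem?_take_of_lt (by omega)]
  rw [List.getElem?_reverse (by simpa using by omega)]
  congr 1
  omega

lemma core (L : List String) :
    (if pvALoop L.reverse [] = [] then "" else (PySem.List.pyGet? (pvALoop L.reverse []) (-1)).getD "")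
    = (match ((PySem.List.enumerate L 0).foldl pvBStep (none, false)).1 with
       | none => ""
       | some i => PySem.Str.strip (pvLstripHash (PySem.Str.strip ((PySem.List.pyGet? L i).getD "")))) := by
  rw [pvALoop_eq, pvB_inv]
  set T := L.reverse.takeWhile pvC with hT
  by_cases he : T.isEmpty
  · simp_all
  · have hne : T ≠ [] := by simpa [List.isEmpty_iff] using he
    have hk : T.length ≤ L.length := by
      calc T.length ≤ L.reverse.length := (List.takeWhile_sublist _).length_le
      _ = L.length := List.length_reverse
    have hmapne : T.map pvClean ≠ [] := by simp [hne]
    have hsc : (if T.isEmpty = true then (none : Option Int)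
        else some ((L.length : Int) - T.length)) = some ((L.length - T.length : Nat) : Int) := by
      rw [if_neg he]
      congr 1
      omega
    simp only [List.nil_append, if_neg hmapne, hsc]
    rw [pyGet?_neg_one _ hmapne, PySem.List.pyGet?_natCast, List.getLast?_map,
      takeWhile_rev_getLast?_eq L (by rw [← hT]; exact he)]
    rw [← hT]
    cases hg : L[L.length - T.length]? with
    | none =>
      exfalso
      rw [List.getElem?_eq_none_iff] at hg
      have hpos : 0 < T.length := List.length_pos_iff.mpr hne
      omega
    | some v => simp [pvClean]

-- ===== VERDICT (by name: the statement is the Claim_ definition above) =====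
theorem extract_rdoc_comment_py_spec : Claim_equal_extract_rdoc_comment_py := by
  intro text pos _
  unfold Spec_extract_rdoc_comment_py extract_rdoc_comment_py extract_rdoc_comment_py_alt
  exact core (PySem.Str.splitlines (PySem.Str.rstrip (PySem.Str.slice text none (some pos))))
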